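-- pv_equiv track=rewrite | github.com/RahulGupta2910/Celebal-Assignment-2 | regex.py | is_valid_regex
-- ===== SOURCE A (Python) =====
-- def is_valid_regex(pattern):
--     repeat_operators = {'*', '+', '?'}
--     for i in range(1, len(pattern)):
--         if pattern[i] in repeat_operators and pattern[i - 1] in repeat_operators and pattern[i - 1] != '\\':
--             return False
--         if pattern[i] in repeat_operators and pattern[i - 1] == '\\':
--             continue
--     return True
-- ===== SOURCE B (Python) =====
-- def is_valid_regex(pattern):
--     repeat_operators = {'*', '+', '?'}
--     positions = [i for i, c in enumerate(pattern) if c in repeat_operators]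
--     return all(b - a != 1 for a, b in zip(positions, positions[1:]))
-- ===== Notes on version B (the rewrite author's own statement) =====
-- stated objective: alternative
-- what changed: B first builds the index table of repeat-operator positions and then checks consecutive entries of that table for adjacency, instead of A's single pass comparing each character with its predecessor (with A's inert backslash branch dropped).
import Mathlib
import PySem

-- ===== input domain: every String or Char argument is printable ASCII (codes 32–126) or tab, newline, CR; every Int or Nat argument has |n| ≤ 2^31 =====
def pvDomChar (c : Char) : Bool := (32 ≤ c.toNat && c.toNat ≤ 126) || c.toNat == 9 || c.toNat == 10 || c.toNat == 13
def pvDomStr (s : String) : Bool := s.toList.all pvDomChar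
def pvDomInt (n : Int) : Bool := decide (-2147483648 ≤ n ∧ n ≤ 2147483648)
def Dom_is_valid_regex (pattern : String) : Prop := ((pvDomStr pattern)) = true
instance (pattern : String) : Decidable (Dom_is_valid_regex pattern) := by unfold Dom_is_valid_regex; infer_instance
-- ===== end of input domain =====

-- B builds the list of repeat-operator positions and checks consecutive table entries for
-- adjacency instead of A's per-character predecessor scan (alternative decomposition, same cost).


-- ===== PORT A =====
-- the loop 'for i in range(1, len(pattern)):' with early return False, carried over the index list
def isValidLoopA (cs : List Char) : List Int → Bool
  | [] => true
  | i :: rest =>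
    if PySem.List.pyGetD cs i ' ' ∈ (['*', '+', '?'] : List Char) ∧
       PySem.List.pyGetD cs (i - 1) ' ' ∈ (['*', '+', '?'] : List Char) ∧
       PySem.List.pyGetD cs (i - 1) ' ' ≠ '\\' then
      false
    else if PySem.List.pyGetD cs i ' ' ∈ (['*', '+', '?'] : List Char) ∧
            PySem.List.pyGetD cs (i - 1) ' ' = '\\' then
      isValidLoopA cs rest
    else
      isValidLoopA cs rest

def is_valid_regex (pattern : String) : Bool :=
  isValidLoopA pattern.toList (PySem.List.pyRange 1 (pattern.toList.length : Int) 1)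

-- ===== PORT B =====
-- positions = [i for i, c in enumerate(pattern) if c in repeat_operators]
def is_valid_regex_alt (pattern : String) : Bool :=
  let positions := (PySem.List.enumerate pattern.toList 0).filterMap
    (fun p => if p.2 ∈ (['*', '+', '?'] : List Char) then some p.1 else none)
  (positions.zip positions.tail).all (fun q => decide (q.2 - q.1 ≠ 1))

-- ===== PRECONDITION & SPEC =====
def Spec_is_valid_regex (pattern : String) (out : Bool) : Prop := out = is_valid_regex_alt pattern
instance (pattern : String) (out : Bool) : Decidable (Spec_is_valid_regex pattern out) := by unfold Spec_is_valid_regex; infer_instance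

-- ===== CLAIM (what is proved, stated in full; the proofs are below) =====
def Claim_equal_is_valid_regex : Prop := ∀ (pattern : String), Dom_is_valid_regex pattern → Spec_is_valid_regex pattern (is_valid_regex pattern)

-- ===== LEMMAS AND PROOFS =====

-- common reference specification: no two adjacent repeat operators
def pvOp (c : Char) : Bool := c ∈ (['*', '+', '?'] : List Char)

def pvNoAdj : List Char → Bool
  | [] => true
  | [_] => true
  | a :: b :: rest => !(pvOp a && pvOp b) && pvNoAdj (b :: rest)

theorem pvNoAdj_short (cs : List Char) (h : cs.length ≤ 1) : pvNoAdj cs = true := by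
  match cs with
  | [] => rfl
  | [_] => rfl
  | _ :: _ :: _ => simp at h

-- A's loop over range(k, len) equals pvNoAdj of the suffix from k-1
theorem loopA_eq (cs : List Char) : ∀ (n : Nat) (k : Int), 1 ≤ k →
    ((cs.length : Int) - k).toNat = n →
    isValidLoopA cs (PySem.List.pyRange k (cs.length : Int) 1) = pvNoAdj (cs.drop (k - 1).toNat) := by
  intro n
  induction n with
  | zero =>
    intro k hk hn
    have hle : (cs.length : Int) ≤ k := by omega
    rw [PySem.List.pyRange_one_eq_nil hle]
    have : (cs.drop (k - 1).toNat).length ≤ 1 := by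
      rw [List.length_drop]; omega
    rw [pvNoAdj_short _ this]; rfl
  | succ m ih =>
    intro k hk hn
    have hlt : k < (cs.length : Int) := by omega
    have hkn : k.toNat < cs.length := by omega
    have hpn : (k - 1).toNat < cs.length := by omega
    rw [PySem.List.pyRange_one_cons hlt]
    have hget : PySem.List.pyGetD cs k ' ' = cs[k.toNat] :=
      PySem.List.pyGetD_eq_getElem cs ' ' (by omega) (by exact_mod_cast hlt)
    have hgetp : PySem.List.pyGetD cs (k - 1) ' ' = cs[(k - 1).toNat] :=
      PySem.List.pyGetD_eq_getElem cs ' ' (by omega) (by omega)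
    have hdrop1 : cs.drop (k - 1).toNat = cs[(k - 1).toNat] :: cs.drop ((k - 1).toNat + 1) :=
      List.drop_eq_getElem_cons hpn
    have hdrop2 : cs.drop ((k - 1).toNat + 1) = cs[k.toNat] :: cs.drop (k.toNat + 1) := by
      have h1 : (k - 1).toNat + 1 = k.toNat := by omega
      rw [h1]
      exact List.drop_eq_getElem_cons hkn
    have hrec : isValidLoopA cs (PySem.List.pyRange (k + 1) (cs.length : Int) 1)
        = pvNoAdj (cs.drop ((k + 1) - 1).toNat) := ih (k + 1) (by omega) (by omega)
    have hkk : ((k + 1) - 1).toNat = (k - 1).toNat + 1 := by omega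
    rw [hkk] at hrec
    rw [isValidLoopA, hget, hgetp, hrec, hdrop1, hdrop2, pvNoAdj]
    by_cases h1 : cs[k.toNat] ∈ (['*', '+', '?'] : List Char) ∧
        cs[(k - 1).toNat] ∈ (['*', '+', '?'] : List Char)
    · have hne : cs[(k - 1).toNat] ≠ '\\' := by
        intro hE
        have hm := h1.2
        rw [hE] at hm
        simp at hm
      rw [if_pos ⟨h1.1, h1.2, hne⟩]
      have hb : (pvOp cs[(k - 1).toNat] && pvOp cs[k.toNat]) = true := by
        simp only [pvOp, Bool.and_eq_true, decide_eq_true_eq]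
        exact ⟨h1.2, h1.1⟩
      rw [hb]
      simp
    · rw [if_neg (fun hc => h1 ⟨hc.1, hc.2.1⟩)]
      have hb : (pvOp cs[(k - 1).toNat] && pvOp cs[k.toNat]) = false := by
        simp only [pvOp, Bool.and_eq_false_iff, decide_eq_false_iff_not]
        by_cases hp : cs[(k - 1).toNat] ∈ (['*', '+', '?'] : List Char)
        · exact Or.inr (fun hq => h1 ⟨hq, hp⟩)
        · exact Or.inl hp
      rw [hb]
      simp only [Bool.not_false, Bool.true_and]
      split_ifs <;> rfl

theorem portA_eq (pattern : String) : is_valid_regex pattern = pvNoAdj pattern.toList := by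
  unfold is_valid_regex
  have := loopA_eq pattern.toList ((pattern.toList.length : Int) - 1).toNat 1 (by omega) rfl
  simpa using this

-- B side: the position-table build
def pvPos : List Char → Int → List Int
  | [], _ => []
  | c :: cs, s => if pvOp c then s :: pvPos cs (s + 1) else pvPos cs (s + 1)

theorem filterMap_enumerate_eq_pvPos (cs : List Char) : ∀ (s : Int),
    (PySem.List.enumerate cs s).filterMap
      (fun p => if p.2 ∈ (['*', '+', '?'] : List Char) then some p.1 else none) = pvPos cs s := by
  induction cs with
  | nil => intro s; simp [PySem.List.enumerate, pvPos]
  | cons c cs ih =>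
    intro s
    rw [PySem.List.enumerate_cons, List.filterMap_cons, pvPos]
    by_cases h : pvOp c
    · have : c ∈ (['*', '+', '?'] : List Char) := by simpa [pvOp] using h
      simp only [this, if_pos, h, ih]
    · have : ¬ c ∈ (['*', '+', '?'] : List Char) := by simpa [pvOp] using h
      simp only [this, h, if_false, ih]
      simp

-- the zip-with-tail check, recursively
def pvChk : List Int → Bool
  | [] => true
  | [_] => true
  | a :: b :: l => decide (b - a ≠ 1) && pvChk (b :: l)

theorem chk_eq (l : List Int) :
    (l.zip l.tail).all (fun q => decide (q.2 - q.1 ≠ 1)) = pvChk l := by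
  induction l with
  | nil => rfl
  | cons a l ih =>
    match l, ih with
    | [], _ => rfl
    | b :: l', ih => rw [pvChk, ← ih]; rfl

theorem pvPos_ge (cs : List Char) : ∀ (s x : Int), x ∈ pvPos cs s → s ≤ x := by
  induction cs with
  | nil => intro s x h; simp [pvPos] at h
  | cons c cs ih =>
    intro s x h
    rw [pvPos] at h
    split_ifs at h with hc
    · rcases List.mem_cons.mp h with h | h
      · omega
      · have := ih (s + 1) x h; omega
    · have := ih (s + 1) x h; omega

theorem chk_pvPos (cs : List Char) : ∀ (s : Int), pvChk (pvPos cs s) = pvNoAdj cs := by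
  induction cs with
  | nil => intro s; rfl
  | cons c cs ih =>
    intro s
    rw [pvPos]
    by_cases hc : pvOp c
    · rw [if_pos hc]
      match cs, ih with
      | [], _ => simp [pvPos, pvChk, pvNoAdj]
      | c' :: rest, ih =>
        rw [pvNoAdj]
        by_cases hc' : pvOp c'
        · show pvChk (s :: pvPos (c' :: rest) (s + 1)) = _
          rw [pvPos, if_pos hc']
          rw [pvChk]
          simp [hc, hc']
        · show pvChk (s :: pvPos (c' :: rest) (s + 1)) = _
          rw [pvPos, if_neg hc']
          have hge := pvPos_ge rest (s + 1 + 1)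
          have htail : pvChk (s :: pvPos rest (s + 1 + 1)) = pvChk (pvPos rest (s + 1 + 1)) := by
            match hh : pvPos rest (s + 1 + 1) with
            | [] => rfl
            | b :: l =>
              have hb : s + 2 ≤ b := by
                have := hge b (by rw [hh]; exact List.mem_cons_self ..); omega
              rw [pvChk]
              have : decide (b - s ≠ 1) = true := by simp; omega
              rw [this, Bool.true_and]
          rw [htail]
          have : pvChk (pvPos rest (s + 1 + 1)) = pvNoAdj (c' :: rest) := by
            rw [← ih (s + 1), pvPos, if_neg hc']
          rw [this]
          simp [hc']
    · rw [if_neg hc]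
      rw [ih (s + 1)]
      match cs with
      | [] => rfl
      | c' :: rest => rw [pvNoAdj]; simp [hc]

theorem portB_eq (pattern : String) : is_valid_regex_alt pattern = pvNoAdj pattern.toList := by
  unfold is_valid_regex_alt
  simp only [filterMap_enumerate_eq_pvPos, chk_eq, chk_pvPos]

-- ===== VERDICT (by name: the statement is the Claim_ definition above) =====
theorem is_valid_regex_spec : Claim_equal_is_valid_regex := by
  intro pattern _
  unfold Spec_is_valid_regex
  rw [portA_eq, portB_eq]
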